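-- pv_equiv track=rewrite | github.com/ramabarreto/Determinar-el-mejor-vendedor | VENDEDORES PARCIAL.py | mejorvendedorxmes
-- ===== SOURCE A (Python) =====
-- meses = 12
--
-- def mejorvendedorxmes(m, f):
--     lista = [0]
--     for i in range (1, meses + 1):
--         lista2 = [0]
--         for j in range (1, f + 1):
--             lista2.append(m[j][i])
--         w = lista2.index(max(lista2))
--         lista.append(w)
--     return lista
-- ===== SOURCE B (Python) =====
-- meses = 12
--
-- def mejorvendedorxmes(m, f):
--     lista = [0]
--     for i in range(1, meses + 1):
--         mejor = 0
--         w = 0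
--         for j in range(1, f + 1):
--             if m[j][i] > mejor:
--                 mejor = m[j][i]
--                 w = j
--         lista.append(w)
--     return lista
-- ===== Notes on version B (the rewrite author's own statement) =====
-- stated objective: simpler
-- what changed: Each month's winner is found by a single inline running-argmax pass (mejor/w with strict >, sentinel 0), replacing A's throwaway list build plus the separate max() scan and .index() scan.
import Mathlib
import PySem

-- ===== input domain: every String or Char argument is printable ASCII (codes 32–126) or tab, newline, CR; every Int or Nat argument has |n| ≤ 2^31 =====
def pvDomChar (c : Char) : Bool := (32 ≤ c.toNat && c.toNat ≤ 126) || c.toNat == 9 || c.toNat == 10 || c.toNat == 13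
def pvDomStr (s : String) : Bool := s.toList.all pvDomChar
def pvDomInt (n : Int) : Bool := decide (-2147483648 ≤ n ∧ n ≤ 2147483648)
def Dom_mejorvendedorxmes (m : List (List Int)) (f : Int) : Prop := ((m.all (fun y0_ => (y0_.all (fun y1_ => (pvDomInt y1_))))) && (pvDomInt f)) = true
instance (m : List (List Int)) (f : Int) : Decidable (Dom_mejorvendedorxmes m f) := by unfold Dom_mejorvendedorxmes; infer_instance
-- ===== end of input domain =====

-- B replaces A's per-month list build + max() scan + .index() scan by one inline running-argmax pass (objective: simpler).

-- ===== PORT A =====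
-- literal port of A: lista=[0]; for i in 1..12: lista2=[0]; for j in 1..f: lista2.append(m[j][i]);
-- w = lista2.index(max(lista2)); lista.append(w)
def mejorvendedorxmes (m : List (List Int)) (f : Int) : List Int :=
  (PySem.List.pyRange 1 13 1).foldl (fun lista i =>
    let lista2 := (PySem.List.pyRange 1 (f + 1) 1).foldl (fun l2 j =>
      l2 ++ [PySem.List.pyGetD (PySem.List.pyGetD m j []) i 0]) [0]
    let w : Int := (((PySem.List.index? lista2
        ((PySem.List.max? lista2 (fun y => y)).getD 0)).getD 0 : Nat) : Int)
    lista ++ [w]) [0]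

-- ===== PORT B =====
-- literal port of B: lista=[0]; for i in 1..12: mejor=0; w=0; for j in 1..f:
-- if m[j][i] > mejor: mejor=m[j][i]; w=j; lista.append(w)
def mejorvendedorxmes_alt (m : List (List Int)) (f : Int) : List Int :=
  (PySem.List.pyRange 1 13 1).foldl (fun lista i =>
    let s := (PySem.List.pyRange 1 (f + 1) 1).foldl (fun (s : Int × Int) j =>
      let v := PySem.List.pyGetD (PySem.List.pyGetD m j []) i 0
      if v > s.1 then (v, j) else s) (0, 0)
    lista ++ [s.2]) [0]

-- ===== PRECONDITION & SPEC =====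
-- Pre_ excludes exactly the inputs where Python A raises IndexError: every accessed row
-- m[j] (j = 1..f) must exist and have at least 13 columns (indices 1..12 are read).
def Pre_mejorvendedorxmes (m : List (List Int)) (f : Int) : Prop :=
  f ≤ 0 ∨ (f < (m.length : Int) ∧ ∀ row ∈ (m.drop 1).take f.toNat, 13 ≤ (row.length : Int))
instance (m : List (List Int)) (f : Int) : Decidable (Pre_mejorvendedorxmes m f) := by
  unfold Pre_mejorvendedorxmes; infer_instance

def pvWitness_mejorvendedorxmes : List (List Int) × Int :=
  ([[0,0,0,0,0,0,0,0,0,0,0,0,0],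
    [0,3,1,0,-2,5,0,7,2,2,0,1,4],
    [0,1,4,0,-1,5,0,6,2,3,0,1,4]], 2)

def Spec_mejorvendedorxmes (m : List (List Int)) (f : Int) (out : List Int) : Prop := out = mejorvendedorxmes_alt m f
instance (m : List (List Int)) (f : Int) (out : List Int) : Decidable (Spec_mejorvendedorxmes m f out) := by unfold Spec_mejorvendedorxmes; infer_instance

-- ===== CLAIM (what is proved, stated in full; the proofs are below) =====
def Claim_equal_mejorvendedorxmes : Prop := ∀ (m : List (List Int)) (f : Int), Dom_mejorvendedorxmes m f → Pre_mejorvendedorxmes m f → Spec_mejorvendedorxmes m f (mejorvendedorxmes m f)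

-- ===== LEMMAS AND PROOFS =====

-- The inner loops agree: index-of-max of the sentinel list equals the running argmax.
theorem pv_inner_inv (g : Int → Int) (b : Int) (hb : 1 ≤ b) :
    (PySem.List.pyRange 1 b 1).foldl
        (fun (s : Int × Int) j => if g j > s.1 then (g j, j) else s) (0, 0)
      = (((PySem.List.pyRange 1 b 1).map g).foldl max 0,
         ((((PySem.List.index? (0 :: ((PySem.List.pyRange 1 b 1).map g))
              (((PySem.List.pyRange 1 b 1).map g).foldl max 0)).getD 0 : Nat)) : Int)) := by
  induction b, hb using Int.le_induction with
  | base =>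
      rw [PySem.List.pyRange_one_eq_nil (by omega)]
      simp
  | succ b hb ih =>
      rw [PySem.List.pyRange_one_succ_right hb]
      simp only [List.foldl_append, List.map_append, List.foldl_cons, List.foldl_nil,
        List.map_cons, List.map_nil]
      rw [ih]
      set vals := (PySem.List.pyRange 1 b 1).map g with hv
      set M := vals.foldl max 0 with hM
      have hlen : (vals.length : Int) = b - 1 := by
        rw [hv]; simp [PySem.List.length_pyRange_one]; omega
      by_cases h : g b > M
      · have hnot : g b ∉ (0 : Int) :: vals := by
          intro hmem
          rcases List.mem_cons.mp hmem with h0 | hm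
          · have := (PySem.List.le_foldl_max vals (0 : Int)).1; rw [← hM] at this; omega
          · have := (PySem.List.le_foldl_max vals (0 : Int)).2 (g b) hm
            rw [← hM] at this; omega
        have hmax : max M (g b) = g b := max_eq_right (le_of_lt h)
        simp only [if_pos h, hmax]
        have hidx := PySem.List.index?_append_singleton_self ((0 : Int) :: vals) (g b) hnot
        rw [show (0 : Int) :: (vals ++ [g b]) = ((0 : Int) :: vals) ++ [g b] from rfl, hidx]
        simp only [Option.getD_some, List.length_cons]
        refine Prod.ext rfl ?_
        push_cast
        omega
      · have hmax : max M (g b) = M := max_eq_left (by omega)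
        simp only [if_neg h, hmax]
        have hmem : M ∈ (0 : Int) :: vals := by
          rcases PySem.List.foldl_max_mem vals (0 : Int) with h0 | hm
          · rw [← hM] at h0; rw [h0]; exact List.mem_cons_self
          · rw [← hM] at hm; exact List.mem_cons_of_mem _ hm
        rw [show (0 : Int) :: (vals ++ [g b]) = ((0 : Int) :: vals) ++ [g b] from rfl,
          PySem.List.index?_append_of_mem _ hmem]

theorem pv_inner_eq (g : Int → Int) (f : Int) :
    ((((PySem.List.index?
        ((PySem.List.pyRange 1 (f + 1) 1).foldl (fun l2 j => l2 ++ [g j]) [0])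
        ((PySem.List.max?
          ((PySem.List.pyRange 1 (f + 1) 1).foldl (fun l2 j => l2 ++ [g j]) [0])
          (fun y => y)).getD 0)).getD 0 : Nat)) : Int)
    = ((PySem.List.pyRange 1 (f + 1) 1).foldl
        (fun (s : Int × Int) j => if g j > s.1 then (g j, j) else s) (0, 0)).2 := by
  rw [PySem.List.foldl_append_singleton_eq_map]
  by_cases hf : 1 ≤ f + 1
  · rw [pv_inner_inv g (f + 1) hf]
    rw [show ([(0 : Int)] ++ (PySem.List.pyRange 1 (f + 1) 1).map g)
        = (0 : Int) :: (PySem.List.pyRange 1 (f + 1) 1).map g from rfl,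
      PySem.List.max?_id_cons]
    simp
  · rw [PySem.List.pyRange_one_eq_nil (by omega)]
    simp [PySem.List.max?_id_cons]

-- ===== VERDICT (by name: the statement is the Claim_ definition above) =====
theorem mejorvendedorxmes_spec : Claim_equal_mejorvendedorxmes := by
  intro m f _ _
  unfold Spec_mejorvendedorxmes mejorvendedorxmes mejorvendedorxmes_alt
  refine PySem.List.foldl_congr_mem _ _ _ _ (fun lista i _ => ?_)
  simp only []
  rw [pv_inner_eq (fun j => PySem.List.pyGetD (PySem.List.pyGetD m j []) i 0) f]
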